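-- pv_equiv track=rewrite | github.com/jinhyuk9714/songsim-campus-mcp | src/songsim_campus/mcp_oauth.py | _parse_cache_ttl
-- ===== SOURCE A (Python) =====
-- JWKS_CACHE_TTL_SECONDS = 300
--
-- def _parse_cache_ttl(cache_control: str | None) -> int:
--     if not cache_control:
--         return JWKS_CACHE_TTL_SECONDS
--     for part in cache_control.split(","):
--         part = part.strip().lower()
--         if part.startswith("max-age="):
--             try:
--                 return max(int(part.split("=", 1)[1]), 1)
--             except ValueError:
--                 return JWKS_CACHE_TTL_SECONDS
--     return JWKS_CACHE_TTL_SECONDS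
-- ===== SOURCE B (Python) =====
-- JWKS_CACHE_TTL_SECONDS = 300
--
-- def _parse_cache_ttl(cache_control):
--     directives = {}
--     for raw in (cache_control or "").split(","):
--         part = raw.strip().lower()
--         name, sep, value = part.partition("=")
--         if sep and name not in directives:
--             directives[name] = value
--     if "max-age" not in directives:
--         return JWKS_CACHE_TTL_SECONDS
--     try:
--         return max(int(directives["max-age"]), 1)
--     except ValueError:
--         return JWKS_CACHE_TTL_SECONDS
-- ===== Notes on version B (the rewrite author's own statement) =====
-- stated objective: alternative
-- what changed: B parses the whole header once into a first-wins dict of directives (name split at the first '=') and then looks up 'max-age', instead of A's linear scan that returns at the first part starting with 'max-age='.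
import Mathlib
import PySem

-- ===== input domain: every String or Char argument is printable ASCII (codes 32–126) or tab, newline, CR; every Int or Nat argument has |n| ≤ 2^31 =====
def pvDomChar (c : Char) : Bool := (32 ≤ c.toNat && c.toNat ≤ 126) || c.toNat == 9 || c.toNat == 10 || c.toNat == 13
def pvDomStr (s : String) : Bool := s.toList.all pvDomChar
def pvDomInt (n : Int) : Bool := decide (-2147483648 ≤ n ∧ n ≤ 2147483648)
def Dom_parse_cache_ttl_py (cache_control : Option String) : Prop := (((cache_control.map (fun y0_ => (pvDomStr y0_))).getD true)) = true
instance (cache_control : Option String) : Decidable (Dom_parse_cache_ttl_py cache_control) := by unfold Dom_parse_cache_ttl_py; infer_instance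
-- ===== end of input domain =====

-- B replaces A's early-returning scan by a first-wins directive table built in one pass and a
-- single 'max-age' lookup afterwards (objective: alternative decomposition, same cost).

-- ===== PORT A =====
-- shared by both ports: 'max(int(v), 1)' with ValueError → default 300 (identical snippet in Source A and Source B)
def pvParseVal (v : String) : Int :=
  match PySem.Int.ofStr? v with
  | some n => max n 1
  | none => 300

def pvLoopA : List String → Int
  | [] => 300
  | p :: rest =>
    let part := PySem.Str.lower (PySem.Str.strip p)
    if PySem.Str.startswith part "max-age=" then
      -- part.split("=", 1)[1]; the index is in range whenever the startswith guard held
      match PySem.List.pyGet? ((PySem.Str.splitMax? part "=" 1).getD []) 1 with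
      | some v => pvParseVal v
      | none => 300
    else pvLoopA rest

def parse_cache_ttl_py (cache_control : Option String) : Int :=
  match cache_control with
  | none => 300
  | some s => if s = "" then 300 else pvLoopA ((PySem.Str.split? s ",").getD [])

-- ===== PORT B =====
-- hand port of str.partition for the one-char separator "=" (exact: split at the FIRST '=',
-- none = separator absent, i.e. Python's empty third component / falsy sep)
def pvPartEq : List Char → Option (List Char × List Char)
  | [] => none
  | c :: rest =>
    if c = '=' then some ([], rest)
    else (pvPartEq rest).map (fun pr => (c :: pr.1, pr.2))

def pvStrPartEq (s : String) : Option (String × String) :=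
  (pvPartEq s.toList).map (fun pr => (String.ofList pr.1, String.ofList pr.2))

def pvStep (d : PySem.Dict String String) (raw : String) : PySem.Dict String String :=
  let part := PySem.Str.lower (PySem.Str.strip raw)
  match pvStrPartEq part with
  | some (name, value) => if d.contains name then d else d.insert name value
  | none => d

def parse_cache_ttl_py_alt (cache_control : Option String) : Int :=
  let d := ((PySem.Str.split? (cache_control.getD "") ",").getD []).foldl pvStep PySem.Dict.empty
  match d.get? "max-age" with
  | some v => pvParseVal v
  | none => 300

-- ===== PRECONDITION & SPEC =====
def Spec_parse_cache_ttl_py (cache_control : Option String) (out : Int) : Prop := out = parse_cache_ttl_py_alt cache_control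
instance (cache_control : Option String) (out : Int) : Decidable (Spec_parse_cache_ttl_py cache_control out) := by unfold Spec_parse_cache_ttl_py; infer_instance

-- ===== CLAIM (what is proved, stated in full; the proofs are below) =====
def Claim_equal_parse_cache_ttl_py : Prop := ∀ (cache_control : Option String), Dom_parse_cache_ttl_py cache_control → Spec_parse_cache_ttl_py cache_control (parse_cache_ttl_py cache_control)

-- ===== LEMMAS AND PROOFS =====

-- pvPartEq characterisation
theorem pvPartEq_some {cs a b : List Char} (h : pvPartEq cs = some (a, b)) :
    cs = a ++ '=' :: b := by
  induction cs generalizing a b with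
  | nil => simp [pvPartEq] at h
  | cons c rest ih =>
    by_cases hc : c = '='
    · subst hc; simp [pvPartEq] at h; simp [← h.1, ← h.2]
    · cases hq : pvPartEq rest with
      | none => simp [pvPartEq, hc, hq] at h
      | some pr =>
        obtain ⟨a', b'⟩ := pr
        simp [pvPartEq, hc, hq] at h
        rw [← h.1, ← h.2]
        simp [ih hq]

theorem pvPartEq_append {a : List Char} (b : List Char) (ha : '=' ∉ a) :
    pvPartEq (a ++ '=' :: b) = some (a, b) := by
  induction a with
  | nil => simp [pvPartEq]
  | cons c rest ih =>
    simp at ha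
    have hc : ¬ c = '=' := fun h => ha.1 h.symm
    simp [pvPartEq, hc, ih ha.2]

-- startswith "max-age=" ↔ partition splits off the name "max-age"
theorem startswith_iff_part (part : String) :
    PySem.Str.startswith part "max-age=" = true ↔
      ∃ b, pvPartEq part.toList = some ("max-age".toList, b) := by
  rw [PySem.Str.startswith_eq, PySem.Chars.startswith_iff]
  have hma : ("max-age=".toList : List Char) = "max-age".toList ++ ['='] := by decide
  have hne : ('=' : Char) ∉ "max-age".toList := by decide
  constructor
  · rintro ⟨t, ht⟩
    refine ⟨t, ?_⟩
    have hcs : part.toList = "max-age".toList ++ '=' :: t := by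
      rw [← ht, hma]; simp
    rw [hcs, pvPartEq_append t hne]
  · rintro ⟨b, hb⟩
    refine ⟨b, ?_⟩
    rw [pvPartEq_some hb, hma]; simp

-- the go loop of splitOnMax with maxsplit exhausted appends the remainder
theorem go_zero (fuel : Nat) (l cur : List Char) (acc : List (List Char)) :
    PySem.Chars.splitOnMax.go ['='] fuel 0 l cur acc = ((cur.reverse ++ l) :: acc).reverse := by
  cases fuel with
  | zero => rfl
  | succ f => cases l with
    | nil => simp [PySem.Chars.splitOnMax.go]
    | cons c rest => simp [PySem.Chars.splitOnMax.go]

-- the go loop with sep "=" and maxsplit 1 computes pvPartEq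
theorem go_one (l : List Char) : ∀ (fuel : Nat) (cur : List Char) (acc : List (List Char)), l.length < fuel →
    PySem.Chars.splitOnMax.go ['='] fuel 1 l cur acc =
      (match pvPartEq l with
       | some (a, b) => acc.reverse ++ [cur.reverse ++ a, b]
       | none => acc.reverse ++ [cur.reverse ++ l]) := by
  induction l with
  | nil =>
    intro fuel cur acc h
    cases fuel with
    | zero => omega
    | succ f => simp [PySem.Chars.splitOnMax.go, pvPartEq]
  | cons c rest ih =>
    intro fuel cur acc h
    cases fuel with
    | zero => omega
    | succ f =>
      by_cases hc : c = '='
      · subst hc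
        simp only [PySem.Chars.splitOnMax.go, List.isPrefixOf, Bool.and_true, beq_self_eq_true,
          if_true, if_neg (by omega : ¬ (1 : Nat) = 0)]
        simp [go_zero, pvPartEq]
      · have hpre : (['='] : List Char).isPrefixOf (c :: rest) = false := by
          simp [List.isPrefixOf]
          exact fun hh => hc hh.symm
        have hrec := ih f (c :: cur) acc (by simpa using Nat.lt_of_succ_lt_succ h)
        simp only [PySem.Chars.splitOnMax.go, hpre, if_neg (by omega : ¬ (1 : Nat) = 0),
          Bool.false_eq_true, if_false]
        rw [hrec]
        cases hq : pvPartEq rest with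
        | none => simp [pvPartEq, hc, hq]
        | some pr => obtain ⟨a, b⟩ := pr; simp [pvPartEq, hc, hq]

theorem splitOnMax_eq_part (cs : List Char) :
    PySem.Chars.splitOnMax cs ['='] 1 =
      (match pvPartEq cs with
       | some (a, b) => [a, b]
       | none => [cs]) := by
  have h := go_one cs (cs.length + 1) [] [] (by omega)
  have h0 : PySem.Chars.splitOnMax cs ['='] 1 =
      PySem.Chars.splitOnMax.go ['='] (cs.length + 1) 1 cs [] [] := by
    simp [PySem.Chars.splitOnMax]
  rw [h0, h]
  cases hq : pvPartEq cs with
  | none => simp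
  | some pr => obtain ⟨a, b⟩ := pr; simp

-- first-wins dict: an existing binding of "max-age" survives the rest of the fold
theorem fold_preserve (ps : List String) : ∀ (d : PySem.Dict String String) (v : String),
    d.get? "max-age" = some v → (ps.foldl pvStep d).get? "max-age" = some v := by
  induction ps with
  | nil => intro d v h; simpa using h
  | cons p rest ih =>
    intro d v h
    simp only [List.foldl_cons, pvStep]
    generalize PySem.Str.lower (PySem.Str.strip p) = part
    apply ih
    cases hp : pvStrPartEq part with
    | none => simpa using h
    | some pr =>
      obtain ⟨name, value⟩ := pr
      by_cases hc : d.contains name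
      · simpa [hc] using h
      · have hne : ("max-age" : String) ≠ name := by
          intro he
          rw [PySem.Dict.contains_eq_isSome_get?, ← he, h] at hc
          simp at hc
        simpa [hc, PySem.Dict.get?_insert_of_ne _ _ hne] using h

-- the B fold followed by the lookup computes exactly A's scan
theorem main_loop (ps : List String) : ∀ (d : PySem.Dict String String),
    d.get? "max-age" = none →
    (match (ps.foldl pvStep d).get? "max-age" with
     | some v => pvParseVal v
     | none => (300 : Int)) = pvLoopA ps := by
  induction ps with
  | nil => intro d h; simp [pvLoopA, h]
  | cons p rest ih =>
    intro d h
    have hcont : d.contains "max-age" = false := by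
      rw [PySem.Dict.contains_eq_isSome_get?, h]; rfl
    simp only [List.foldl_cons, pvLoopA, pvStep]
    generalize PySem.Str.lower (PySem.Str.strip p) = part
    by_cases hs : PySem.Str.startswith part "max-age=" = true
    · obtain ⟨b, hb⟩ := (startswith_iff_part part).mp hs
      have hsp : pvStrPartEq part = some ("max-age", String.ofList b) := by
        unfold pvStrPartEq
        rw [hb]
        simp
      rw [if_pos hs]
      have hsplit : PySem.Str.splitMax? part "=" 1 = some ["max-age", String.ofList b] := by
        have heq : ("=" : String).toList = ['='] := by decide
        unfold PySem.Str.splitMax? PySem.Chars.splitMax?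
        rw [heq, splitOnMax_eq_part, hb]
        simp
      rw [hsplit]
      simp only [hsp, hcont, Bool.false_eq_true, if_false]
      rw [fold_preserve rest (d.insert "max-age" (String.ofList b)) (String.ofList b)
          (PySem.Dict.get?_insert_self _ _ _)]
      simp [PySem.List.pyGet?, PySem.List.pyIdx?]
    · rw [if_neg hs]
      cases hp : pvStrPartEq part with
      | none => exact ih d h
      | some pr =>
        obtain ⟨name, value⟩ := pr
        have hne : ("max-age" : String) ≠ name := by
          intro he
          apply hs
          rw [startswith_iff_part]
          unfold pvStrPartEq at hp
          cases hq : pvPartEq part.toList with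
          | none => rw [hq] at hp; simp at hp
          | some pr2 =>
            obtain ⟨a2, b2⟩ := pr2
            rw [hq] at hp
            simp at hp
            have ha2 : a2 = "max-age".toList := by
              have h1 : String.ofList a2 = "max-age" := by rw [hp.1, ← he]
              have h2 := congrArg String.toList h1
              simpa [String.toList_ofList] using h2
            exact ⟨b2, by rw [ha2]⟩
        by_cases hc : d.contains name
        · simp only [hc, if_true]
          exact ih d h
        · simp only [hc, Bool.false_eq_true, if_false]
          apply ih
          rw [PySem.Dict.get?_insert_of_ne _ _ hne]
          exact h

-- evaluating both ports on the empty header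
theorem base_empty :
    (match (((PySem.Str.split? "" ",").getD []).foldl pvStep PySem.Dict.empty).get? "max-age" with
     | some v => pvParseVal v
     | none => (300 : Int)) = 300 := by decide

-- ===== VERDICT (by name: the statement is the Claim_ definition above) =====
theorem parse_cache_ttl_py_spec : Claim_equal_parse_cache_ttl_py := by
  intro cache_control _
  unfold Spec_parse_cache_ttl_py
  cases cache_control with
  | none =>
    show (300 : Int) = _
    simpa [parse_cache_ttl_py_alt] using base_empty.symm
  | some s =>
    show (if s = "" then (300 : Int) else pvLoopA ((PySem.Str.split? s ",").getD [])) = _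
    by_cases hs : s = ""
    · subst hs
      rw [if_pos rfl]
      simpa [parse_cache_ttl_py_alt] using base_empty.symm
    · rw [if_neg hs]
      unfold parse_cache_ttl_py_alt
      simp only [Option.getD_some]
      exact (main_loop _ PySem.Dict.empty (by simp)).symm
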